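-- pv_equiv track=rewrite | github.com/vikramjit-sidhu/algorithms | hacker_rank/strings/sherlock_anagrm_brute.py | create_substr_hash
-- ===== SOURCE A (Python) =====
-- def create_substr_hash(word):
--     substr_dict = {}    #storing the substrings in a hash with size of substr : list of substr pairs
--     substr_dict[1] = []
--     for index, char in enumerate(word):
--         substr = char
--         substr_dict[1].append(substr)
--         len_substr = 1
--         for char2 in word[index+1:]:
--             substr += char2
--             len_substr += 1
--             if len_substr in substr_dict:
--                 substr_dict[len_substr].append(''.join(sorted(substr)))
--             else:
--                 substr_dict[len_substr] = [''.join(sorted(substr))]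
--     return substr_dict
-- ===== SOURCE B (Python) =====
-- def create_substr_hash(word):
--     n = len(word)
--     substr_dict = {1: [c for c in word]}
--     for length in range(2, n + 1):
--         substr_dict[length] = [''.join(sorted(word[i:i + length]))
--                                for i in range(n - length + 1)]
--     return substr_dict
-- ===== Notes on version B (the rewrite author's own statement) =====
-- stated objective: alternative
-- what changed: B iterates length-major, building each length's list of sorted substrings directly from slices in one comprehension, instead of A's index-major incremental string extension with a create-or-append dict branch.
import Mathlib
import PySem

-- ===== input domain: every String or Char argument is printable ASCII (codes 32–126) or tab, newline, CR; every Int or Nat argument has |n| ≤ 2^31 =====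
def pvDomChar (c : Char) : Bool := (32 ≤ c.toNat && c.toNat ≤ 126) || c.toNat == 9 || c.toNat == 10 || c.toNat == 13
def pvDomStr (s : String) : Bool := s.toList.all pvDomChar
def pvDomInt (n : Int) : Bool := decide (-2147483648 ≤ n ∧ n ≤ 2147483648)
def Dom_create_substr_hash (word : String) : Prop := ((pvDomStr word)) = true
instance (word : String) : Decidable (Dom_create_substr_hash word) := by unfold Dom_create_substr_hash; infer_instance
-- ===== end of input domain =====

-- B builds each length's list of sorted substrings directly (length-major), instead of A's
-- index-major incremental extension with a create-or-append branch; objective: alternative decomposition.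

-- ===== PORT A =====
-- inner loop body: `substr += char2; len_substr += 1; if len_substr in substr_dict: append else create`
def stepA_inner (st : List Char × Int × PySem.Dict Int (List String)) (ch2 : Char) :
    List Char × Int × PySem.Dict Int (List String) :=
  let substr := st.1 ++ [ch2]
  let len_substr := st.2.1 + 1
  let d := st.2.2
  let d' := if d.contains len_substr then
      PySem.Dict.modify d len_substr [] (fun l => l ++ [String.ofList (PySem.List.sorted substr (fun c => c))])
    else
      PySem.Dict.insert d len_substr [String.ofList (PySem.List.sorted substr (fun c => c))]
  (substr, len_substr, d')

-- outer loop body: `substr = char; substr_dict[1].append(substr); len_substr = 1; for char2 in word[index+1:] …`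
def stepA_outer (cs : List Char) (d : PySem.Dict Int (List String)) (p : Int × Char) :
    PySem.Dict Int (List String) :=
  let d1 := PySem.Dict.modify d 1 [] (fun l => l ++ [String.ofList [p.2]])
  ((PySem.List.slice cs (some (p.1 + 1)) none).foldl stepA_inner ([p.2], 1, d1)).2.2

def create_substr_hash (word : String) : List (Int × List String) :=
  let cs := word.toList
  let d0 : PySem.Dict Int (List String) := PySem.Dict.insert PySem.Dict.empty 1 []
  ((PySem.List.enumerate cs).foldl (stepA_outer cs) d0).items

-- ===== PORT B =====
def create_substr_hash_alt (word : String) : List (Int × List String) :=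
  let cs := word.toList
  let n : Int := cs.length
  let d0 : PySem.Dict Int (List String) := PySem.Dict.insert PySem.Dict.empty 1 (cs.map (fun c => String.ofList [c]))
  ((PySem.List.pyRange 2 (n + 1) 1).foldl (fun d L =>
      PySem.Dict.insert d L ((PySem.List.pyRange 0 (n - L + 1) 1).map (fun i =>
        String.ofList (PySem.List.sorted (PySem.List.slice cs (some i) (some (i + L))) (fun c => c))))) d0).items

-- ===== PRECONDITION & SPEC =====
def Spec_create_substr_hash (word : String) (out : List (Int × List String)) : Prop := out = create_substr_hash_alt word
instance (word : String) (out : List (Int × List String)) : Decidable (Spec_create_substr_hash word out) := by unfold Spec_create_substr_hash; infer_instance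

-- ===== CLAIM (what is proved, stated in full; the proofs are below) =====
def Claim_equal_create_substr_hash : Prop := ∀ (word : String), Dom_create_substr_hash word → Spec_create_substr_hash word (create_substr_hash word)

-- ===== LEMMAS AND PROOFS =====

-- the single-character string word[i]
def oneStr (c : Char) : String := String.ofList [c]

-- ''.join(sorted(word[s:s+L]))
def rowElem (cs : List Char) (L s : Nat) : String :=
  String.ofList (PySem.List.sorted ((cs.drop s).take L) (fun c => c))

-- the first m sorted substrings of length L (starts 0..m-1)
def pvRow (cs : List Char) (L m : Nat) : List String := (List.range m).map (rowElem cs L)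

-- the shape of the dict's items throughout A's loops: key 1 holds the first i single chars,
-- keys 2..m+1 hold, for length k+2, the first (g k) sorted substrings
def pvTab (cs : List Char) (i : Nat) (g : Nat → Nat) (m : Nat) : List (Int × List String) :=
  ((1 : Int), (cs.take i).map oneStr) ::
    (List.range m).map (fun (k : Nat) => (((k : Int) + 2), pvRow cs (k + 2) (g k)))

-- how many length-keys exist after i outer iterations
def kmax (n i : Nat) : Nat := if i = 0 then 0 else n - 1

-- the per-length fill level during inner iteration i, after j inner steps
def gA (n i j k : Nat) : Nat := if k < j then i + 1 else min i (n - 1 - k)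

lemma contains_pvTab (cs : List Char) (i : Nat) (g : Nat → Nat) (m j : Nat) :
    (PySem.Dict.mk (pvTab cs i g m)).contains ((j : Int) + 2) = decide (j < m) := by
  simp [PySem.Dict.contains, pvTab, Function.comp_def]
  have h1 : ((1:Int) == (j:Int) + 2) = false := by simp; omega
  rw [h1, Bool.false_or]
  by_cases h : j < m
  · simp only [h, decide_true, List.any_eq_true]
    exact ⟨j, List.mem_range.mpr h, beq_self_eq_true _⟩
  · simp only [h, decide_false, List.any_eq_false]
    intro x hx hxe
    have hcast : (x:Int) + 2 = (j:Int) + 2 := beq_iff_eq.mp hxe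
    have hxj : x = j := by omega
    exact h (hxj ▸ List.mem_range.mp hx)

lemma pvTab_congr (cs : List Char) (i : Nat) (g g' : Nat → Nat) (m : Nat)
    (h : ∀ k, k < m → g k = g' k) : pvTab cs i g m = pvTab cs i g' m := by
  unfold pvTab
  congr 1
  exact List.map_congr_left (fun k hk => by rw [h k (List.mem_range.mp hk)])

lemma pvRow_succ (cs : List Char) (L m : Nat) :
    pvRow cs L (m + 1) = pvRow cs L m ++ [rowElem cs L m] := by
  simp [pvRow, List.range_succ]

lemma nodup_keys_pvTab (cs : List Char) (i : Nat) (g : Nat → Nat) (m : Nat) :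
    (PySem.Dict.mk (pvTab cs i g m)).keys.Nodup := by
  show (pvTab cs i g m).map (·.1) |>.Nodup
  simp only [pvTab, List.map_cons, List.map_map]
  constructor
  · intro x hx
    obtain ⟨k, hk, hkx⟩ := List.mem_map.mp hx
    simp only [Function.comp_apply] at hkx
    omega
  · refine List.Nodup.map ?_ List.nodup_range
    intro a b hab
    simp only [Function.comp_apply] at hab
    omega

lemma getD_pvTab (cs : List Char) (i : Nat) (g : Nat → Nat) (m j : Nat) (hj : j < m) :
    (PySem.Dict.mk (pvTab cs i g m)).getD ((j : Int) + 2) [] = pvRow cs (j + 2) (g j) := by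
  apply PySem.Dict.getD_of_mem_items
  · show _ ∈ pvTab cs i g m
    unfold pvTab
    exact List.mem_cons_of_mem _ (List.mem_map.mpr ⟨j, List.mem_range.mpr hj, rfl⟩)
  · exact nodup_keys_pvTab cs i g m

lemma modify_pvTab (cs : List Char) (i : Nat) (g : Nat → Nat) (m j : Nat) (hj : j < m)
    (v : String) (hv : v = rowElem cs (j + 2) (g j)) :
    PySem.Dict.modify (PySem.Dict.mk (pvTab cs i g m)) ((j : Int) + 2) [] (fun l => l ++ [v])
      = PySem.Dict.mk (pvTab cs i (fun k => if k = j then g j + 1 else g k) m) := by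
  have hc : (PySem.Dict.mk (pvTab cs i g m)).contains ((j : Int) + 2) = true := by
    rw [contains_pvTab]; exact decide_eq_true hj
  simp only [PySem.Dict.modify, getD_pvTab cs i g m j hj]
  apply PySem.Dict.ext
  rw [PySem.Dict.items_insert_of_contains _ _ hc]
  show (pvTab cs i g m).map _ = pvTab cs i _ m
  have hhead : ((1:Int) == (j:Int) + 2) = false := by simp; omega
  simp only [pvTab, List.map_cons, List.map_map, hhead, Bool.false_eq_true, if_false]
  congr 1
  apply List.map_congr_left
  intro a ha
  have ham := List.mem_range.mp ha
  simp only [Function.comp_apply]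
  by_cases haj : a = j
  · subst haj
    simp [pvRow_succ, hv]
  · have hne : ((a:Int) + 2 == (j:Int) + 2) = false := by
      simp only [beq_eq_false_iff_ne, ne_eq]; omega
    simp [hne, haj]

lemma insert_pvTab (cs : List Char) (i : Nat) (g : Nat → Nat) (m : Nat)
    (v : String) (hv : v = rowElem cs (m + 2) 0) :
    PySem.Dict.insert (PySem.Dict.mk (pvTab cs i g m)) ((m : Int) + 2) [v]
      = PySem.Dict.mk (pvTab cs i (fun k => if k = m then 1 else g k) (m + 1)) := by
  have hc : (PySem.Dict.mk (pvTab cs i g m)).contains ((m : Int) + 2) = false := by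
    rw [contains_pvTab]; simp
  apply PySem.Dict.ext
  rw [PySem.Dict.items_insert_of_not_contains _ _ hc]
  show pvTab cs i g m ++ [((m:Int) + 2, [v])] = pvTab cs i _ (m + 1)
  have h1 : (List.range m).map (fun (k : Nat) => ((k:Int)+2, pvRow cs (k+2) (if k = m then 1 else g k)))
      = (List.range m).map (fun (k : Nat) => ((k:Int)+2, pvRow cs (k+2) (g k))) :=
    List.map_congr_left (fun a ha => by
      have := List.mem_range.mp ha
      simp [show a ≠ m by omega])
  have h2 : pvRow cs (m+2) (if m = m then 1 else g m) = [v] := by simp [pvRow, hv]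
  simp only [pvTab, List.range_succ, List.map_append, List.map_cons, List.map_nil, h1]
  simp [pvRow, hv]

lemma take_drop_snoc (cs : List Char) (i j : Nat) (h : i + 1 + j < cs.length) :
    (cs.drop i).take (j + 1) ++ [cs[i + 1 + j]] = (cs.drop i).take (j + 2) := by
  have hlt : j + 1 < (cs.drop i).length := by simp [List.length_drop]; omega
  conv_rhs => rw [show j + 2 = (j + 1) + 1 from rfl, List.take_add_one]
  have : (cs.drop i)[j+1]? = some cs[i + 1 + j] := by
    rw [List.getElem?_drop]
    rw [List.getElem?_eq_getElem (by omega)]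
    congr 1
    congr 1
    omega
  rw [this]
  rfl

lemma innerA (cs : List Char) (i : Nat) (hi : i < cs.length) :
    ∀ (r j : Nat), j + r = cs.length - (i + 1) →
      ((((cs.drop (i + 1)).drop j).foldl stepA_inner
          ((cs.drop i).take (j + 1), (j : Int) + 1,
            PySem.Dict.mk (pvTab cs (i + 1) (gA cs.length i j) (max (kmax cs.length i) j)))).2.2 : PySem.Dict Int (List String))
        = PySem.Dict.mk (pvTab cs (i + 1) (gA cs.length i (cs.length - (i + 1)))
            (max (kmax cs.length i) (cs.length - (i + 1)))) := by
  intro r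
  induction r with
  | zero =>
    intro j hj
    have hj' : j = cs.length - (i + 1) := by omega
    subst hj'
    have hnil : (cs.drop (i + 1)).drop (cs.length - (i + 1)) = [] := by
      apply List.drop_eq_nil_of_le
      simp [List.length_drop]
    rw [hnil]
    rfl
  | succ r ih =>
    intro j hj
    have hjn : i + 1 + j < cs.length := by omega
    have hcons : (cs.drop (i + 1)).drop j = cs[i + 1 + j] :: (cs.drop (i + 1)).drop (j + 1) := by
      simp only [List.drop_drop]
      rw [List.drop_eq_getElem_cons (show i + 1 + j < cs.length by omega)]
      constructor
    rw [hcons, List.foldl_cons]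
    have hstep : stepA_inner ((cs.drop i).take (j + 1), (j : Int) + 1,
          PySem.Dict.mk (pvTab cs (i + 1) (gA cs.length i j) (max (kmax cs.length i) j))) cs[i + 1 + j]
        = ((cs.drop i).take (j + 2), (((j + 1 : Nat) : Int)) + 1,
          PySem.Dict.mk (pvTab cs (i + 1) (gA cs.length i (j + 1)) (max (kmax cs.length i) (j + 1)))) := by
      have hsub := take_drop_snoc cs i j hjn
      have hkey : ((j:Int) + 1) + 1 = ((j:Nat):Int) + 2 := by ring
      simp only [stepA_inner, hsub, hkey, Prod.mk.injEq]
      refine ⟨by trivial, by push_cast; ring, ?_⟩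
      by_cases hi0 : i = 0
      · subst hi0
        rw [show max (kmax cs.length 0) j = j by simp [kmax], contains_pvTab]
        simp only [lt_irrefl, decide_false, Bool.false_eq_true, if_false]
        rw [insert_pvTab cs (0 + 1) (gA cs.length 0 j) j (String.ofList (PySem.List.sorted ((cs.drop 0).take (j + 2)) (fun c => c))) rfl]
        rw [show max (kmax cs.length 0) (j + 1) = j + 1 by simp [kmax]]
        congr 1
        apply pvTab_congr
        intro k hk
        simp only [gA]
        split_ifs <;> omega
      · have hjlt : j < cs.length - 1 := by omega
        rw [show max (kmax cs.length i) j = cs.length - 1 by simp [kmax, hi0]; omega, contains_pvTab]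
        simp only [hjlt, decide_true, if_true]
        rw [modify_pvTab cs (i + 1) (gA cs.length i j) (cs.length - 1) j hjlt _
          (by simp only [rowElem, gA, if_neg (lt_irrefl j)]
              rw [show min i (cs.length - 1 - j) = i by omega])]
        rw [show max (kmax cs.length i) (j + 1) = cs.length - 1 by simp [kmax, hi0]; omega]
        congr 1
        apply pvTab_congr
        intro k hk
        simp only [gA]
        split_ifs <;> omega
    rw [hstep]
    have := ih (j + 1) (by omega)
    push_cast at this ⊢
    exact this

lemma modify1_pvTab (cs : List Char) (i : Nat) (hi : i < cs.length) (g : Nat → Nat) (m : Nat) :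
    PySem.Dict.modify (PySem.Dict.mk (pvTab cs i g m)) 1 [] (fun l => l ++ [String.ofList [cs[i]]])
      = PySem.Dict.mk (pvTab cs (i + 1) g m) := by
  have hc : (PySem.Dict.mk (pvTab cs i g m)).contains 1 = true := by
    simp [PySem.Dict.contains, pvTab]
  have hg : (PySem.Dict.mk (pvTab cs i g m)).getD 1 [] = (cs.take i).map oneStr := by
    apply PySem.Dict.getD_of_mem_items
    · exact List.mem_cons_self
    · exact nodup_keys_pvTab cs i g m
  simp only [PySem.Dict.modify, hg]
  apply PySem.Dict.ext
  rw [PySem.Dict.items_insert_of_contains _ _ hc]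
  show (pvTab cs i g m).map _ = pvTab cs (i + 1) g m
  simp only [pvTab, List.map_cons, List.map_map]
  have htake : (cs.take (i + 1)).map oneStr = (cs.take i).map oneStr ++ [oneStr cs[i]] := by
    rw [List.take_add_one, List.getElem?_eq_getElem hi, List.map_append]
    rfl
  simp [htake, oneStr]
  intro a ha hcontra
  omega

lemma outer_step (cs : List Char) (i : Nat) (hi : i < cs.length) :
    stepA_outer cs (PySem.Dict.mk (pvTab cs i (fun k => min i (cs.length - 1 - k)) (kmax cs.length i))) ((i : Int), cs[i])
      = PySem.Dict.mk (pvTab cs (i + 1) (fun k => min (i + 1) (cs.length - 1 - k)) (kmax cs.length (i + 1))) := by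
  unfold stepA_outer
  simp only
  rw [modify1_pvTab cs i hi]
  have hsl : PySem.List.slice cs (some ((i : Int) + 1)) none = cs.drop (i + 1) := by
    rw [show ((i : Int) + 1) = ((i + 1 : Nat) : Int) by push_cast; ring]
    exact PySem.List.slice_from_natCast cs (i + 1)
  rw [hsl]
  have hinit : (([cs[i]], (1 : Int),
        PySem.Dict.mk (pvTab cs (i + 1) (fun k => min i (cs.length - 1 - k)) (kmax cs.length i)))
        : List Char × Int × PySem.Dict Int (List String))
      = ((cs.drop i).take (0 + 1), ((0 : Nat) : Int) + 1,
        PySem.Dict.mk (pvTab cs (i + 1) (gA cs.length i 0) (max (kmax cs.length i) 0))) := by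
    refine Prod.ext ?_ (Prod.ext (by norm_num) ?_)
    · show [cs[i]] = (cs.drop i).take 1
      rw [List.drop_eq_getElem_cons hi]
      rfl
    · show PySem.Dict.mk _ = PySem.Dict.mk _
      rw [Nat.max_zero]
      exact congrArg PySem.Dict.mk (pvTab_congr _ _ _ _ _ (fun k hk => by simp [gA]))
  rw [show cs.drop (i + 1) = (cs.drop (i + 1)).drop 0 from rfl, hinit,
    innerA cs i hi (cs.length - (i + 1)) 0 (by omega)]
  congr 1
  rw [show max (kmax cs.length i) (cs.length - (i + 1)) = kmax cs.length (i + 1) by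
    simp only [kmax, if_neg (Nat.succ_ne_zero i)]
    split_ifs <;> omega]
  apply pvTab_congr
  intro k hk
  have hk' : k < cs.length - 1 := by
    simp only [kmax, if_neg (Nat.succ_ne_zero i)] at hk
    omega
  simp only [gA]
  split_ifs <;> omega

lemma outerA (cs : List Char) :
    ∀ (r i : Nat), i + r = cs.length →
      (PySem.List.enumerate (cs.drop i) (i : Int)).foldl (stepA_outer cs)
          (PySem.Dict.mk (pvTab cs i (fun k => min i (cs.length - 1 - k)) (kmax cs.length i)))
        = PySem.Dict.mk (pvTab cs cs.length (fun k => min cs.length (cs.length - 1 - k)) (kmax cs.length cs.length)) := by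
  intro r
  induction r with
  | zero =>
    intro i hi
    have : i = cs.length := by omega
    subst this
    rw [List.drop_length]
    rfl
  | succ r ih =>
    intro i hi
    have hlt : i < cs.length := by omega
    rw [List.drop_eq_getElem_cons hlt, PySem.List.enumerate_cons, List.foldl_cons,
      outer_step cs i hlt]
    have := ih (i + 1) (by omega)
    push_cast at this ⊢
    exact this

lemma A_items (cs : List Char) :
    ((PySem.List.enumerate cs).foldl (stepA_outer cs) (PySem.Dict.insert PySem.Dict.empty 1 [])).items
      = pvTab cs cs.length (fun k => min cs.length (cs.length - 1 - k)) (kmax cs.length cs.length) := by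
  have h0 : (PySem.Dict.insert PySem.Dict.empty 1 ([] : List String))
      = PySem.Dict.mk (pvTab cs 0 (fun k => min 0 (cs.length - 1 - k)) (kmax cs.length 0)) := by
    apply PySem.Dict.ext
    simp [PySem.Dict.insert, PySem.Dict.empty, PySem.Dict.contains, pvTab, kmax]
  have := outerA cs cs.length 0 (by omega)
  rw [List.drop_zero] at this
  rw [h0, show PySem.List.enumerate cs 0 = PySem.List.enumerate cs ((0 : Nat) : Int) by norm_num, this]

lemma B_items (cs : List Char) :
    ((PySem.List.pyRange 2 ((cs.length : Int) + 1) 1).foldl (fun d L =>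
        PySem.Dict.insert d L ((PySem.List.pyRange 0 ((cs.length : Int) - L + 1) 1).map (fun i =>
          String.ofList (PySem.List.sorted (PySem.List.slice cs (some i) (some (i + L))) (fun c => c)))))
        (PySem.Dict.insert PySem.Dict.empty 1 (cs.map (fun c => String.ofList [c])))).items
      = pvTab cs cs.length (fun k => min cs.length (cs.length - 1 - k)) (kmax cs.length cs.length) := by
  rw [PySem.Dict.items_foldl_insert_fresh _ (fun L => L) _ _
    (fun L hL => by
      have h2L := (PySem.List.mem_pyRange_one.mp hL).1
      rw [PySem.Dict.contains_insert, PySem.Dict.contains_empty, Bool.or_false]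
      simp only [beq_eq_false_iff_ne, ne_eq]
      omega)
    (by rw [List.map_id']; exact PySem.List.nodup_pyRange_one _ _)]
  have hd0 : (PySem.Dict.insert PySem.Dict.empty 1 (cs.map (fun c => String.ofList [c]))).items
      = [((1 : Int), cs.map oneStr)] := by
    simp [PySem.Dict.insert, PySem.Dict.empty, PySem.Dict.contains, oneStr]
  rw [hd0]
  show _ = ((1 : Int), (cs.take cs.length).map oneStr) :: _
  rw [List.take_length]
  show _ :: _ = _ :: _
  congr 1
  rw [PySem.List.pyRange_one 2 ((cs.length : Int) + 1), List.map_map,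
    show ((cs.length : Int) + 1 - 2).toNat = cs.length - 1 by omega,
    show kmax cs.length cs.length = cs.length - 1 by unfold kmax; split_ifs <;> omega]
  apply List.map_congr_left
  intro k hk
  have hkn := List.mem_range.mp hk
  simp only [Function.comp_apply]
  have hL : (2 : Int) + (k : Int) = ((k + 2 : Nat) : Int) := by push_cast; ring
  rw [hL]
  refine Prod.ext rfl ?_
  show _ = pvRow cs (k + 2) _
  rw [show ((cs.length : Int) - ((k + 2 : Nat) : Int) + 1) = ((cs.length - 1 - k : Nat) : Int) by push_cast; omega]
  rw [PySem.List.pyRange_zero_nat, List.map_map]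
  rw [show min cs.length (cs.length - 1 - k) = cs.length - 1 - k by omega]
  apply List.map_congr_left
  intro s hs
  simp only [Function.comp_apply]
  rw [PySem.List.slice_natCast_add cs s (k + 2)]
  rfl

-- ===== VERDICT (by name: the statement is the Claim_ definition above) =====
theorem create_substr_hash_spec : Claim_equal_create_substr_hash := by
  intro word _
  show create_substr_hash word = create_substr_hash_alt word
  unfold create_substr_hash create_substr_hash_alt
  rw [A_items word.toList, ← B_items word.toList]
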